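-- pv_equiv track=rewrite | github.com/qn06142/coding-python | hades_scam1.py | calculate_minimum_cost
-- ===== SOURCE A (Python) =====
-- def calculate_minimum_cost(n, c, heights):
--     # Initial cost without any modification
--     original_cost = c * sum(abs(heights[i] - heights[i+1]) for i in range(n-1))
--     min_cost = original_cost
--
--     # Try increasing each pole height by x (0 <= x <= 1000)
--     for i in range(n):
--         for x in range(0, 1001):
--             # Calculate new heights
--             new_heights = heights[:]
--             new_heights[i] += x
--
--             # Calculate new cost
--             new_cost = c * sum(abs(new_heights[j] - new_heights[j+1]) for j in range(n-1)) + x * x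
--
--             # Update minimum cost
--             min_cost = min(min_cost, new_cost)
--
--     return min_cost
-- ===== SOURCE B (Python) =====
-- def calculate_minimum_cost(n, c, heights):
--     total = sum(abs(heights[j] - heights[j + 1]) for j in range(n - 1))
--     best = c * total
--     for i in range(n):
--         left = abs(heights[i - 1] - heights[i]) if i >= 1 else 0
--         right = abs(heights[i] - heights[i + 1]) if i < n - 1 else 0
--         for x in range(0, 1001):
--             lx = abs(heights[i - 1] - heights[i] - x) if i >= 1 else 0
--             rx = abs(heights[i] + x - heights[i + 1]) if i < n - 1 else 0
--             cand = c * (total - left - right + lx + rx) + x * x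
--             if cand < best:
--                 best = cand
--     return best
-- ===== Notes on version B (the rewrite author's own statement) =====
-- stated objective: faster
-- what changed: B computes the total adjacency cost once and, for each candidate (i, x), replaces only the one or two edges incident to pole i in O(1), instead of copying the list and recomputing the whole adjacency sum for every candidate.
import Mathlib
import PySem

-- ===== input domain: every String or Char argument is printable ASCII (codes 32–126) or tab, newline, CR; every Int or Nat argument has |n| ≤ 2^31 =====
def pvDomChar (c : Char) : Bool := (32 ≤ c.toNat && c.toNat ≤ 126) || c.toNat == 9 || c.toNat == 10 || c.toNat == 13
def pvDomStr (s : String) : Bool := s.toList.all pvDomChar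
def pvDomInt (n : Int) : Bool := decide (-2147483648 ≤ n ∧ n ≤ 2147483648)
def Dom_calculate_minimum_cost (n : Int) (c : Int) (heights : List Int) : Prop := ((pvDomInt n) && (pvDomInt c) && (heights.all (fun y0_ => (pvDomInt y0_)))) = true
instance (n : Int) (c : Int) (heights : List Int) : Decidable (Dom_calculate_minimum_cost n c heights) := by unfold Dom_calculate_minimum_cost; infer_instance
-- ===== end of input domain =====

-- B precomputes the total adjacency cost once and, for each candidate (i, x), replaces only the one or two
-- edges adjacent to pole i, instead of recomputing the whole sum (objective: faster).

-- ===== PORT A =====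
def calculate_minimum_cost (n : Int) (c : Int) (heights : List Int) : Int :=
  let original_cost := c * ((PySem.List.pyRange 0 (n - 1) 1).foldl
      (fun acc i => acc + |PySem.List.pyGetD heights i 0 - PySem.List.pyGetD heights (i + 1) 0|) 0)
  (PySem.List.pyRange 0 n 1).foldl (fun min_cost i =>
    (PySem.List.pyRange 0 1001 1).foldl (fun min_cost x =>
      let new_heights := PySem.List.pySetD heights i (PySem.List.pyGetD heights i 0 + x)
      let new_cost := c * ((PySem.List.pyRange 0 (n - 1) 1).foldl
          (fun acc j => acc + |PySem.List.pyGetD new_heights j 0 - PySem.List.pyGetD new_heights (j + 1) 0|) 0) + x * x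
      min min_cost new_cost) min_cost) original_cost

-- ===== PORT B =====
def calculate_minimum_cost_alt (n : Int) (c : Int) (heights : List Int) : Int :=
  let total := (PySem.List.pyRange 0 (n - 1) 1).foldl
      (fun acc j => acc + |PySem.List.pyGetD heights j 0 - PySem.List.pyGetD heights (j + 1) 0|) 0
  (PySem.List.pyRange 0 n 1).foldl (fun best i =>
    let left := if 1 ≤ i then |PySem.List.pyGetD heights (i - 1) 0 - PySem.List.pyGetD heights i 0| else 0
    let right := if i < n - 1 then |PySem.List.pyGetD heights i 0 - PySem.List.pyGetD heights (i + 1) 0| else 0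
    (PySem.List.pyRange 0 1001 1).foldl (fun best x =>
      let lx := if 1 ≤ i then |PySem.List.pyGetD heights (i - 1) 0 - PySem.List.pyGetD heights i 0 - x| else 0
      let rx := if i < n - 1 then |PySem.List.pyGetD heights i 0 + x - PySem.List.pyGetD heights (i + 1) 0| else 0
      let cand := c * (total - left - right + lx + rx) + x * x
      if cand < best then cand else best) best) (c * total)

-- ===== PRECONDITION & SPEC =====
-- Pre_ excludes exactly the inputs on which A raises IndexError: n larger than the number of poles.
def Pre_calculate_minimum_cost (n : Int) (c : Int) (heights : List Int) : Prop := n ≤ (heights.length : Int)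
instance (n : Int) (c : Int) (heights : List Int) : Decidable (Pre_calculate_minimum_cost n c heights) := by unfold Pre_calculate_minimum_cost; infer_instance
def pvWitness_calculate_minimum_cost : Int × Int × List Int := (3, 2, [5, 1, 9])
def Spec_calculate_minimum_cost (n : Int) (c : Int) (heights : List Int) (out : Int) : Prop := out = calculate_minimum_cost_alt n c heights
instance (n : Int) (c : Int) (heights : List Int) (out : Int) : Decidable (Spec_calculate_minimum_cost n c heights out) := by unfold Spec_calculate_minimum_cost; infer_instance

-- ===== CLAIM (what is proved, stated in full; the proofs are below) =====
def Claim_equal_calculate_minimum_cost : Prop := ∀ (n : Int) (c : Int) (heights : List Int), Dom_calculate_minimum_cost n c heights → Pre_calculate_minimum_cost n c heights → Spec_calculate_minimum_cost n c heights (calculate_minimum_cost n c heights)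

-- ===== LEMMAS AND PROOFS =====

theorem range_map_sum (f : Nat → Int) (n : Nat) :
    ((List.range n).map f).sum = ∑ i ∈ Finset.range n, f i := by
  induction n with
  | zero => simp
  | succ n ih => rw [List.range_succ, Finset.sum_range_succ, List.map_append, List.sum_append]; simp [ih]

-- sum of |A k - A (k+1)| over the first m edges
def edgeSum (m : Nat) (A : Nat → Int) : Int := ∑ k ∈ Finset.range m, |A k - A (k + 1)|

theorem fold_eq_edgeSum (m : Int) (hs : List Int) :
    (PySem.List.pyRange 0 m 1).foldl
      (fun acc j => acc + |PySem.List.pyGetD hs j 0 - PySem.List.pyGetD hs (j + 1) 0|) 0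
    = edgeSum m.toNat (fun k => hs.getD k 0) := by
  rw [PySem.List.pyRange_one, PySem.List.foldl_add, List.map_map, range_map_sum, zero_add]
  unfold edgeSum
  rw [show (m - 0 : Int) = m by ring]
  apply Finset.sum_congr rfl
  intro k _
  simp only [Function.comp_apply, zero_add]
  rw [show ((k : Int) + 1) = ((k + 1 : Nat) : Int) by push_cast; ring]
  rw [PySem.List.pyGetD_natCast, PySem.List.pyGetD_natCast]

theorem getD_set_eq (L : List Int) (i' k : Nat) (v : Int) (hi : i' < L.length) :
    (L.set i' v).getD k 0 = if k = i' then v else L.getD k 0 := by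
  rcases eq_or_ne k i' with h | h
  · subst h
    simp [List.getD_eq_getElem?_getD, hi]
  · simp [List.getD_eq_getElem?_getD, h, (Ne.symm h)]

theorem edgeSum_update (m i' : Nat) (A : Nat → Int) (v : Int) (him : i' ≤ m) :
    edgeSum m (fun k => if k = i' then v else A k)
      = edgeSum m A
        - (if 1 ≤ i' then |A (i' - 1) - A i'| else 0)
        - (if i' < m then |A i' - A (i' + 1)| else 0)
        + (if 1 ≤ i' then |A (i' - 1) - v| else 0)
        + (if i' < m then |v - A (i' + 1)| else 0) := by
  have hpt : ∀ k, |(if k = i' then v else A k) - (if k + 1 = i' then v else A (k + 1))|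
      = |A k - A (k + 1)|
        + ((if k = i' - 1 ∧ 1 ≤ i' then |A (i' - 1) - v| - |A (i' - 1) - A i'| else 0)
          + (if k = i' then |v - A (i' + 1)| - |A i' - A (i' + 1)| else 0)) := by
    intro k
    by_cases h1 : k = i'
    · subst h1
      have h2 : ¬(k + 1 = k) := by omega
      have h3 : ¬(k = k - 1 ∧ 1 ≤ k) := by omega
      rw [if_pos rfl, if_neg h2, if_neg h3, if_pos rfl]
      ring
    · by_cases h2 : k + 1 = i'
      · subst h2
        have h3 : (k = k + 1 - 1 ∧ 1 ≤ k + 1) := by omega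
        rw [if_neg h1, if_pos rfl, if_pos h3, if_neg h1, Nat.add_sub_cancel]
        ring
      · have h3 : ¬(k = i' - 1 ∧ 1 ≤ i') := by omega
        simp [h1, h2, h3]
  unfold edgeSum
  simp only
  rw [Finset.sum_congr rfl (fun k _ => hpt k), Finset.sum_add_distrib, Finset.sum_add_distrib]
  rw [Finset.sum_ite_eq' (Finset.range m) i' (fun _ => |v - A (i' + 1)| - |A i' - A (i' + 1)|)]
  by_cases h1 : 1 ≤ i'
  · have hm1 : i' - 1 ∈ Finset.range m := by simp [Finset.mem_range]; omega
    simp only [h1, and_true]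
    rw [Finset.sum_ite_eq' (Finset.range m) (i' - 1) (fun _ => |A (i' - 1) - v| - |A (i' - 1) - A i'|)]
    simp only [hm1, if_true, Finset.mem_range]
    by_cases h2 : i' < m
    · simp only [if_pos h2]; ring
    · simp only [if_neg h2]; ring
  · have h0 : i' = 0 := by omega
    subst h0
    simp only [Finset.mem_range]
    norm_num
    by_cases h2 : 0 < m
    · simp only [if_pos h2]; ring
    · simp only [if_neg h2]; ring

theorem inner_cost_eq (n : Int) (heights : List Int) (hn : n ≤ (heights.length : Int))
    (i x : Int) (hi0 : 0 ≤ i) (hin : i < n) :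
    (PySem.List.pyRange 0 (n - 1) 1).foldl
      (fun acc j => acc + |PySem.List.pyGetD (PySem.List.pySetD heights i (PySem.List.pyGetD heights i 0 + x)) j 0
        - PySem.List.pyGetD (PySem.List.pySetD heights i (PySem.List.pyGetD heights i 0 + x)) (j + 1) 0|) 0
    = (PySem.List.pyRange 0 (n - 1) 1).foldl
        (fun acc j => acc + |PySem.List.pyGetD heights j 0 - PySem.List.pyGetD heights (j + 1) 0|) 0
      - (if 1 ≤ i then |PySem.List.pyGetD heights (i - 1) 0 - PySem.List.pyGetD heights i 0| else 0)
      - (if i < n - 1 then |PySem.List.pyGetD heights i 0 - PySem.List.pyGetD heights (i + 1) 0| else 0)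
      + (if 1 ≤ i then |PySem.List.pyGetD heights (i - 1) 0 - PySem.List.pyGetD heights i 0 - x| else 0)
      + (if i < n - 1 then |PySem.List.pyGetD heights i 0 + x - PySem.List.pyGetD heights (i + 1) 0| else 0) := by
  have hlen : i.toNat < heights.length := by omega
  rw [PySem.List.pySetD_of_nonneg heights (PySem.List.pyGetD heights i 0 + x) hi0]
  rw [fold_eq_edgeSum, fold_eq_edgeSum]
  have hA : (fun k => (heights.set i.toNat (PySem.List.pyGetD heights i 0 + x)).getD k 0)
      = fun k => if k = i.toNat then heights.getD i.toNat 0 + x else heights.getD k 0 := by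
    funext k
    rw [getD_set_eq _ _ _ _ hlen, PySem.List.pyGetD_of_nonneg heights 0 hi0]
  rw [hA, edgeSum_update _ _ _ _ (by omega : i.toNat ≤ (n - 1).toNat)]
  rw [PySem.List.pyGetD_of_nonneg heights 0 hi0]
  by_cases h1 : 1 ≤ i
  · have h1n : 1 ≤ i.toNat := by omega
    rw [PySem.List.pyGetD_of_nonneg heights (i := i - 1) 0 (by omega)]
    rw [PySem.List.pyGetD_of_nonneg heights (i := i + 1) 0 (by omega)]
    have e1 : (i - 1).toNat = i.toNat - 1 := by omega
    have e2 : (i + 1).toNat = i.toNat + 1 := by omega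
    rw [e1, e2]
    by_cases h2 : i < n - 1
    · have h2n : i.toNat < (n - 1).toNat := by omega
      simp only [if_pos h1, if_pos h1n, if_pos h2, if_pos h2n]
      rw [sub_add_eq_sub_sub]
    · have h2n : ¬(i.toNat < (n - 1).toNat) := by omega
      simp only [if_pos h1, if_pos h1n, if_neg h2, if_neg h2n]
      rw [sub_add_eq_sub_sub]
  · have h1n : ¬(1 ≤ i.toNat) := by omega
    by_cases h2 : i < n - 1
    · have h2n : i.toNat < (n - 1).toNat := by omega
      rw [PySem.List.pyGetD_of_nonneg heights (i := i + 1) 0 (by omega)]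
      have e2 : (i + 1).toNat = i.toNat + 1 := by omega
      rw [e2]
      simp only [if_neg h1, if_neg h1n, if_pos h2, if_pos h2n]
    · have h2n : ¬(i.toNat < (n - 1).toNat) := by omega
      simp only [if_neg h1, if_neg h1n, if_neg h2, if_neg h2n]

-- ===== VERDICT (by name: the statement is the Claim_ definition above) =====
theorem calculate_minimum_cost_spec : Claim_equal_calculate_minimum_cost := by
  intro n c heights _ hpre
  unfold Spec_calculate_minimum_cost
  unfold calculate_minimum_cost calculate_minimum_cost_alt
  apply PySem.List.foldl_congr_mem
  intro acc i hi
  rw [PySem.List.mem_pyRange_one] at hi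
  apply PySem.List.foldl_congr_mem
  intro acc2 x hx
  rw [PySem.List.mem_pyRange_one] at hx
  simp only
  rw [inner_cost_eq n heights hpre i x hi.1 hi.2]
  rw [min_def]
  split_ifs <;> omega
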